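-- pv_equiv track=rewrite | github.com/tusharv01/Line_Coder | LineEncoder.py | B8ZS
-- ===== SOURCE A (Python) =====
-- def B8ZS(inpt):
--     inp = inpt[0:]
--     r = []
--     prev = 1
--     count = 0
--     for i in range(len(inp)):
--         if inp[i] == 0:
--             count = 1
--             for j in range(1, 8):
--                 if i + j < len(inp):
--                     if inp[i + j] == 0:
--                         count += 1
--                     else:
--                         break
--                 else:
--                     break
--             if count == 8:
--                 for j in range(1, 8):
--                     inp[i + j] = -1
--                 r.append(0)
--                 r.append(0)
--                 r.append(0)
--                 r.append(prev)
--                 prev = prev * -1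
--                 r.append(prev)
--                 r.append(0)
--                 r.append(prev)
--                 prev = prev * -1
--                 r.append(prev)
--                 count = 0
--             else:
--                 r.append(inp[i])
--         elif inp[i] == 1:
--             prev = inp[i]
--             r.append(inp[i])
--         else:
--             continue
--     return r
-- ===== SOURCE B (Python) =====
-- def B8ZS(inpt):
--     out = []
--     prev = 1
--     i = 0
--     n = len(inpt)
--     while i < n:
--         if i + 7 < n and all(inpt[i + j] == 0 for j in range(8)):
--             out += [0, 0, 0, prev, -prev, 0, -prev, prev]
--             i += 8
--         elif inpt[i] == 0:
--             out.append(0)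
--             i += 1
--         elif inpt[i] == 1:
--             prev = 1
--             out.append(1)
--             i += 1
--         else:
--             i += 1
--     return out
-- ===== Notes on version B (the rewrite author's own statement) =====
-- stated objective: simpler
-- what changed: A copies the input, marks the seven zeros consumed by a B8ZS substitution with a -1 sentinel and still visits every index, skipping the sentinels; B keeps a cursor in a single while loop that jumps 8 positions past a substituted run, so the copy, the sentinel writes and the skip-visits disappear.
import Mathlib
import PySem

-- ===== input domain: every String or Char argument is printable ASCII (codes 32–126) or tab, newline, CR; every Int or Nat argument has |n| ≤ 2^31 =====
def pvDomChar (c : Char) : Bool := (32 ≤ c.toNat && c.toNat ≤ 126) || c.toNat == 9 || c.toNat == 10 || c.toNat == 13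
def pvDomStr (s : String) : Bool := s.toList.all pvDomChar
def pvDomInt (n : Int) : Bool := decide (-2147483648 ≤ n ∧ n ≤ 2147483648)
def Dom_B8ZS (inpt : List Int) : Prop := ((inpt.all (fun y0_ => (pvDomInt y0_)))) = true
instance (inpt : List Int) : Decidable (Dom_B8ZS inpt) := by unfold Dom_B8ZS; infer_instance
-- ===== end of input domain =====

-- B replaces A's sentinel mechanism (marking consumed zeros as -1 in a copy of the input,
-- then skipping them index by index) with a cursor that jumps past a substituted run.
-- A mutates only a local copy, never its argument, so return-value equivalence is the whole story.

-- ===== PORT A =====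
-- inner 'for j in range(1, 8)' counting loop with its two breaks, literally
def B8ZS_count (inp : List Int) (i : Nat) (j : Nat) (count : Int) : Int :=
  if j < 8 then
    if i + j < inp.length then
      if inp.getD (i + j) 0 = 0 then B8ZS_count inp i (j + 1) (count + 1)
      else count
    else count
  else count
termination_by 8 - j

-- 'for j in range(1, 8): inp[i + j] = -1'
def B8ZS_mark (inp : List Int) (i : Nat) : List Int :=
  (List.range' 1 7).foldl (fun l j => l.set (i + j) (-1)) inp

-- one iteration of A's outer for-loop; state = (inp, r, prev, count)
def B8ZS_step (st : List Int × List Int × Int × Int) (i : Nat) :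
    List Int × List Int × Int × Int :=
  let (inp, r, prev, count) := st
  if inp.getD i 0 = 0 then
    let count := B8ZS_count inp i 1 1
    if count = 8 then
      let inp := B8ZS_mark inp i
      let r := r ++ [0, 0, 0, prev]
      let prev := prev * -1
      let r := r ++ [prev, 0, prev]
      let prev := prev * -1
      let r := r ++ [prev]
      (inp, r, prev, 0)
    else (inp, r ++ [inp.getD i 0], prev, count)
  else if inp.getD i 0 = 1 then (inp, r ++ [inp.getD i 0], inp.getD i 0, count)
  else (inp, r, prev, count)

def B8ZS (inpt : List Int) : List Int :=
  let inp := inpt  -- inpt[0:] copies; the copy, not the argument, is mutated below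
  ((List.range inp.length).foldl B8ZS_step (inp, [], 1, 0)).2.1

-- ===== PORT B =====
-- the while loop of Source B: cursor i, running prev, output built as the recursion unwinds
def B8ZS_go (inpt : List Int) (i : Nat) (prev : Int) : List Int :=
  if i < inpt.length then
    if i + 7 < inpt.length ∧ (List.range 8).all (fun j => inpt.getD (i + j) 0 == 0) then
      0 :: 0 :: 0 :: prev :: -prev :: 0 :: -prev :: prev :: B8ZS_go inpt (i + 8) prev
    else if inpt.getD i 0 = 0 then 0 :: B8ZS_go inpt (i + 1) prev
    else if inpt.getD i 0 = 1 then 1 :: B8ZS_go inpt (i + 1) 1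
    else B8ZS_go inpt (i + 1) prev
  else []
termination_by inpt.length - i

def B8ZS_alt (inpt : List Int) : List Int := B8ZS_go inpt 0 1

-- ===== PRECONDITION & SPEC =====
def Spec_B8ZS (inpt : List Int) (out : List Int) : Prop := out = B8ZS_alt inpt
instance (inpt : List Int) (out : List Int) : Decidable (Spec_B8ZS inpt out) := by unfold Spec_B8ZS; infer_instance

-- ===== CLAIM (what is proved, stated in full; the proofs are below) =====
def Claim_equal_B8ZS : Prop := ∀ (inpt : List Int), Dom_B8ZS inpt → Spec_B8ZS inpt (B8ZS inpt)

-- ===== LEMMAS AND PROOFS =====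

theorem getD_set (l : List Int) (m k : Nat) (v : Int) :
    (l.set m v).getD k 0 = if m = k ∧ k < l.length then v else l.getD k 0 := by
  simp [List.getD, List.getElem?_set]
  split_ifs with h1 h2 <;> simp_all

theorem length_mark (inp : List Int) (i : Nat) : (B8ZS_mark inp i).length = inp.length := by
  simp [B8ZS_mark, List.range']

theorem getD_mark (inp : List Int) (i k : Nat) :
    (B8ZS_mark inp i).getD k 0 =
      if i + 1 ≤ k ∧ k ≤ i + 7 ∧ k < inp.length then -1 else inp.getD k 0 := by
  show ((List.range' 1 7).foldl (fun l j => l.set (i + j) (-1)) inp).getD k 0 = _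
  simp only [List.range', List.foldl, getD_set, List.length_set]
  split_ifs <;> omega

theorem count_eq_iff (inp : List Int) (i : Nat) :
    ∀ m j c, 8 - j = m → j ≤ 8 →
    (B8ZS_count inp i j c = c + (8 - (j : Int)) ↔
      ∀ k, j ≤ k → k < 8 → i + k < inp.length ∧ inp.getD (i + k) 0 = 0) := by
  intro m
  induction m with
  | zero =>
    intro j c hm hj
    rw [B8ZS_count]
    simp only [show ¬ j < 8 by omega, if_false]
    constructor
    · intro _ k hk1 hk2; omega
    · intro _; omega
  | succ d ih =>
    intro j c hm hj
    rw [B8ZS_count]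
    simp only [show j < 8 by omega, if_true]
    split_ifs with h1 h2
    · have := ih (j+1) (c+1) (by omega) (by omega)
      push_cast at this
      rw [show c + 1 + (8 - ((j:Int)+1)) = c + (8 - (j:Int)) by ring] at this
      rw [this]
      constructor
      · intro h k hk1 hk2
        rcases Nat.eq_or_lt_of_le hk1 with rfl | hlt
        · exact ⟨h1, h2⟩
        · exact h k (by omega) hk2
      · intro h k hk1 hk2; exact h k (by omega) hk2
    · constructor
      · intro h; exfalso; omega
      · intro h; exfalso; exact h2 (h j le_rfl (by omega)).2
    · constructor
      · intro h; exfalso; omega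
      · intro h; exfalso; exact h1 (h j le_rfl (by omega)).1

theorem count8_iff (inp : List Int) (i : Nat) :
    (B8ZS_count inp i 1 1 = 8 ↔
      ∀ k, 1 ≤ k → k < 8 → i + k < inp.length ∧ inp.getD (i + k) 0 = 0) := by
  have := count_eq_iff inp i 7 1 1 rfl (by omega)
  norm_num at this
  exact this

theorem step_skip (st : List Int × List Int × Int × Int) (k : Nat)
    (h : st.1.getD k 0 = -1) : B8ZS_step st k = st := by
  obtain ⟨a, b, c, d⟩ := st
  simp only at h
  simp only [B8ZS_step, h]
  norm_num

theorem fold_skip7 (st : List Int × List Int × Int × Int) (i : Nat)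
    (h : ∀ j, 1 ≤ j → j ≤ 7 → st.1.getD (i + j) 0 = -1) :
    (List.range' (i + 1) 7).foldl B8ZS_step st = st := by
  simp only [List.range', List.foldl]
  rw [step_skip st (i+1) (h 1 (by omega) (by omega))]
  rw [step_skip st (i+1+1) (by rw [show i+1+1 = i+2 by omega]; exact h 2 (by omega) (by omega))]
  rw [step_skip st (i+1+1+1) (by rw [show i+1+1+1 = i+3 by omega]; exact h 3 (by omega) (by omega))]
  rw [step_skip st (i+1+1+1+1) (by rw [show i+1+1+1+1 = i+4 by omega]; exact h 4 (by omega) (by omega))]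
  rw [step_skip st (i+1+1+1+1+1) (by rw [show i+1+1+1+1+1 = i+5 by omega]; exact h 5 (by omega) (by omega))]
  rw [step_skip st (i+1+1+1+1+1+1) (by rw [show i+1+1+1+1+1+1 = i+6 by omega]; exact h 6 (by omega) (by omega))]
  rw [step_skip st (i+1+1+1+1+1+1+1) (by rw [show i+1+1+1+1+1+1+1 = i+7 by omega]; exact h 7 (by omega) (by omega))]

theorem main_lemma (inpt : List Int) :
    ∀ d i inp r prev count, inpt.length - i ≤ d → inp.length = inpt.length →
      (∀ j, i ≤ j → inp.getD j 0 = inpt.getD j 0) →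
      ((List.range' i (inpt.length - i)).foldl B8ZS_step (inp, r, prev, count)).2.1
        = r ++ B8ZS_go inpt i prev := by
  intro d
  induction d with
  | zero =>
    intro i inp r prev count hd hlen hagree
    rw [B8ZS_go]
    simp only [show ¬ i < inpt.length by omega, if_false]
    simp [show inpt.length - i = 0 by omega]
  | succ d ih =>
    intro i inp r prev count hd hlen hagree
    by_cases hi : i < inpt.length
    · rw [show inpt.length - i = (inpt.length - (i+1)) + 1 by omega, List.range'_succ,
        List.foldl_cons]
      have hv : inp.getD i 0 = inpt.getD i 0 := hagree i le_rfl
      rw [B8ZS_go]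
      simp only [hi, if_true]
      by_cases hv0 : inpt.getD i 0 = 0
      · by_cases hall : ∀ k, 1 ≤ k → k < 8 → i + k < inp.length ∧ inp.getD (i + k) 0 = 0
        · -- substitution case
          have hcount : B8ZS_count inp i 1 1 = 8 := (count8_iff inp i).2 hall
          have hstep : B8ZS_step (inp, r, prev, count) i =
              (B8ZS_mark inp i, r ++ [0, 0, 0, prev] ++ [prev * -1, 0, prev * -1]
                ++ [prev * -1 * -1], prev * -1 * -1, 0) := by
            simp only [B8ZS_step, hv, hv0, hcount]; norm_num
          rw [hstep]
          have h7 : i + 7 < inpt.length := by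
            have := (hall 7 (by omega) (by omega)).1; omega
          have hBcond : (i + 7 < inpt.length ∧
              ((List.range 8).all fun j => inpt.getD (i + j) 0 == 0) = true) := by
            refine ⟨h7, ?_⟩
            simp only [List.all_eq_true, List.mem_range, beq_iff_eq]
            intro k hk
            rcases Nat.eq_zero_or_pos k with rfl | hkpos
            · simpa using hv0
            · have := (hall k (by omega) hk).2
              rw [hagree (i + k) (by omega)] at this
              exact this
          simp only [hBcond]
          have hsplit : inpt.length - (i + 1) = 7 + (inpt.length - (i + 8)) := by omega
          rw [hsplit, ← List.range'_append, List.foldl_append]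
          rw [fold_skip7 _ i (by
            intro j hj1 hj7
            show (B8ZS_mark inp i).getD (i + j) 0 = -1
            rw [getD_mark, if_pos (⟨by omega, by omega, by omega⟩ :
              i + 1 ≤ i + j ∧ i + j ≤ i + 7 ∧ i + j < inp.length)])]
          rw [show i + 1 + 7 = i + 8 by omega]
          rw [ih (i + 8) (B8ZS_mark inp i) _ _ 0 (by omega)
            (by rw [length_mark]; exact hlen)
            (by
              intro j hj
              rw [getD_mark]
              simp only [show ¬(i + 1 ≤ j ∧ j ≤ i + 7 ∧ j < inp.length) by omega, if_false]
              exact hagree j (by omega))]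
          have hprev : prev * -1 * -1 = prev := by ring
          have hprev2 : prev * -1 = -prev := by ring
          rw [hprev, hprev2]
          simp [List.append_assoc]
        · -- single 0
          have hcount : ¬ B8ZS_count inp i 1 1 = 8 := by
            intro h; exact hall ((count8_iff inp i).1 h)
          have hstep : B8ZS_step (inp, r, prev, count) i =
              (inp, r ++ [inp.getD i 0], prev, B8ZS_count inp i 1 1) := by
            simp only [B8ZS_step, hv, hv0, hcount]; norm_num
          rw [hstep]
          have hBcond : ¬ (i + 7 < inpt.length ∧
              ((List.range 8).all fun j => inpt.getD (i + j) 0 == 0) = true) := by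
            rintro ⟨h7, hall8⟩
            apply hall
            intro k hk1 hk8
            simp only [List.all_eq_true, List.mem_range, beq_iff_eq] at hall8
            refine ⟨by omega, ?_⟩
            rw [hagree (i + k) (by omega)]
            exact hall8 k hk8
          simp only [hBcond, if_false, hv0, if_true]
          rw [ih (i + 1) inp _ _ _ (by omega) hlen (fun j hj => hagree j (by omega))]
          rw [hv, hv0]
          simp [List.append_assoc]
      · -- not a zero at i
        have hBcond : ¬ (i + 7 < inpt.length ∧
            ((List.range 8).all fun j => inpt.getD (i + j) 0 == 0) = true) := by
          rintro ⟨_, hall8⟩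
          simp only [List.all_eq_true, List.mem_range, beq_iff_eq] at hall8
          exact hv0 (by simpa using hall8 0 (by omega))
        simp only [hBcond, if_false, hv0, if_false]
        by_cases hv1 : inpt.getD i 0 = 1
        · have hstep : B8ZS_step (inp, r, prev, count) i =
              (inp, r ++ [inp.getD i 0], inp.getD i 0, count) := by
            simp only [B8ZS_step, hv, hv1]; norm_num
          rw [hstep, hv, hv1]
          simp only [if_true]
          rw [ih (i + 1) inp _ _ _ (by omega) hlen (fun j hj => hagree j (by omega))]
          simp [List.append_assoc]
        · have hstep : B8ZS_step (inp, r, prev, count) i = (inp, r, prev, count) := by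
            simp only [B8ZS_step, hv, hv0, hv1]; norm_num
          rw [hstep]
          simp only [hv1, if_false]
          exact ih (i + 1) inp _ _ _ (by omega) hlen (fun j hj => hagree j (by omega))
    · rw [B8ZS_go]
      simp only [hi, if_false]
      simp [show inpt.length - i = 0 by omega]

-- ===== VERDICT (by name: the statement is the Claim_ definition above) =====
theorem B8ZS_spec : Claim_equal_B8ZS := by
  intro inpt _
  unfold Spec_B8ZS B8ZS B8ZS_alt
  have := main_lemma inpt inpt.length 0 inpt [] 1 0 (by omega) rfl (fun _ _ => rfl)
  simpa [List.range_eq_range'] using this
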